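-- pv_equiv track=rewrite | github.com/alclass/cxlots | fs/mathfs/metrics/distance_xs_ys_sums_metric.py | calc_distance_xs_ys_sums_metric_f_cardgame
-- ===== SOURCE A (Python) =====
-- import math
--
-- def extract_x_y_from_dozen_intval(intval):
--   dozendigit = math.floor((intval-1)/10) + 1
--   colweight = intval % 10
--   colweight = colweight if colweight > 0 else 10
--   x, y = colweight, dozendigit
--   return x, y
--
-- def trans_dozens_to_points(dozens):
--   xs_n_ys = list(map(lambda e: extract_x_y_from_dozen_intval(e), dozens))
--   return xs_n_ys
--
-- def calc_distance_xs_ys_sums_metric_f_cardgame(dozens):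
--   """
--
--   The explanation of the graphshape metric may be seen by an example:
--
--   Suppose dozens = (4, 12, 23, 33, 45, 51)
--   Their corresponding points are: ((4, 1), (2,2), (3,3), (3, 4), (5,5), (1, 6))
--     There will be an x-point with a minimal integer and also a minimum y-point.
--       The x part of the metric is the sum of all x-distances to this minimum x.
--       The y part of the metric is the sum of all y-distances to this minimum x.
--   The calculation is the following:
--   Point (1, 6) [dozen 51] contains the minimum x, ie x=1
--   Point (4, 1) [dozen 4] contains the minimum y, ie y=1
--     The x-distances are: (4-1, 2-1, 3-1, 3-1. 5-1, 1-1)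
--       ie (3, 1, 2, 2, 4, 0) and its sum 12
--     The y-distances are: (1-1, 2-1, 3-1, 4-1, 5-1, 6-1)
--       ie (0, 1, 2, 3, 4, 5) and its sum 15
--   The result is then (12, 15) ie the x-distances sum and the y-distances sum
--   """
--   points = trans_dozens_to_points(dozens)
--   xs = list(map(lambda e: e[0], points))
--   ys = list(map(lambda e: e[1], points))
--   min_x, min_y = min(xs), min(ys)
--   xdistances = [x - min_x for x in xs]
--   ydistances = [y - min_y for y in ys]
--   dist_sum_xs_ys_tuple = sum(xdistances), sum(ydistances)
--   return dist_sum_xs_ys_tuple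
-- ===== SOURCE B (Python) =====
-- import math
--
-- def extract_x_y_from_dozen_intval(intval):
--   dozendigit = math.floor((intval-1)/10) + 1
--   colweight = intval % 10
--   colweight = colweight if colweight > 0 else 10
--   return colweight, dozendigit
--
-- def calc_distance_xs_ys_sums_metric_f_cardgame(dozens):
--   # Single pass: keep running count, sums and minima, then use the identity
--   # sum(v - m for v in vs) == sum(vs) - len(vs) * min(vs).
--   n = 0
--   sum_x = sum_y = 0
--   min_x = min_y = None
--   for d in dozens:
--     x, y = extract_x_y_from_dozen_intval(d)
--     n += 1
--     sum_x += x
--     sum_y += y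
--     if min_x is None or x < min_x:
--       min_x = x
--     if min_y is None or y < min_y:
--       min_y = y
--   return sum_x - n * min_x, sum_y - n * min_y
-- ===== Notes on version B (the rewrite author's own statement) =====
-- stated objective: alternative
-- what changed: Replaces A's five intermediate lists (points, xs, ys, xdistances, ydistances) and separate min/sum passes with a single fold keeping (count, sums, running minima) and the algebraic identity sum(v - m) = sum(vs) - len * min(vs).
-- outside the precondition, e.g. on calc_distance_xs_ys_sums_metric_f_cardgame([]): A raises ValueError, B raises TypeError
import Mathlib
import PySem

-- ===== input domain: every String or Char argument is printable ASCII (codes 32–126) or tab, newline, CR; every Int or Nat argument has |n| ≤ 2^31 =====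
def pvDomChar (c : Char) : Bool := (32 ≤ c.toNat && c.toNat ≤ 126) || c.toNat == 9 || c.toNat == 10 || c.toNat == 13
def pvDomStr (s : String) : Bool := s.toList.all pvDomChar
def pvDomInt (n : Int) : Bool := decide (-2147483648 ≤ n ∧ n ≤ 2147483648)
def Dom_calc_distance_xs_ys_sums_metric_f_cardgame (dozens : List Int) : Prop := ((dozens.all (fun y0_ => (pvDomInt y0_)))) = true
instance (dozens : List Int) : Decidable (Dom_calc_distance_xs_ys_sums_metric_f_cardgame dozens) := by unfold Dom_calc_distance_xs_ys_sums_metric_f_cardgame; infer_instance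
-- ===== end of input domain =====

-- B replaces A's five intermediate lists with one fold keeping (count, sums, minima)
-- and the identity sum(v - m) = sum(vs) - len * min(vs); return value only.

-- ===== PORT A =====
-- extract_x_y_from_dozen_intval; math.floor((intval-1)/10) is exact floor division on Dom
def extract_x_y_from_dozen_intval (intval : Int) : Int × Int :=
  let dozendigit := PySem.Int.floordiv (intval - 1) 10 + 1
  let colweight := PySem.Int.mod intval 10
  let colweight := if colweight > 0 then colweight else 10
  (colweight, dozendigit)

def trans_dozens_to_points (dozens : List Int) : List (Int × Int) :=
  dozens.map (fun e => extract_x_y_from_dozen_intval e)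

def calc_distance_xs_ys_sums_metric_f_cardgame (dozens : List Int) : Int × Int :=
  let points := trans_dozens_to_points dozens
  let xs := points.map (fun e => e.1)
  let ys := points.map (fun e => e.2)
  match PySem.List.min? xs (fun x => x), PySem.List.min? ys (fun y => y) with
  | some min_x, some min_y =>
      ((xs.map (fun x => x - min_x)).sum, (ys.map (fun y => y - min_y)).sum)
  | _, _ => (0, 0)   -- min([]) raises ValueError in Python: excluded by Pre_

-- ===== PORT B =====
def pvFoldStep (st : Int × Int × Int × Option Int × Option Int) (d : Int) :
    Int × Int × Int × Option Int × Option Int :=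
  let (n, sx, sy, mx, my) := st
  let (x, y) := extract_x_y_from_dozen_intval d
  (n + 1, sx + x, sy + y,
   some (match mx with | none => x | some m => if x < m then x else m),
   some (match my with | none => y | some m => if y < m then y else m))

def calc_distance_xs_ys_sums_metric_f_cardgame_alt (dozens : List Int) : Int × Int :=
  let st := dozens.foldl pvFoldStep (0, 0, 0, none, none)
  let (n, sx, sy, mx, my) := st
  (sx - n * mx.getD 0, sy - n * my.getD 0)   -- mx/my are none (Python: TypeError) only outside Pre_

-- ===== PRECONDITION & SPEC =====
-- A raises ValueError (min of an empty sequence) on []: excluded.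
def Pre_calc_distance_xs_ys_sums_metric_f_cardgame (dozens : List Int) : Prop := dozens ≠ []
instance (dozens : List Int) : Decidable (Pre_calc_distance_xs_ys_sums_metric_f_cardgame dozens) := by unfold Pre_calc_distance_xs_ys_sums_metric_f_cardgame; infer_instance
def pvWitness_calc_distance_xs_ys_sums_metric_f_cardgame : List Int := [4, 12, 23, 33, 45, 51]

def Spec_calc_distance_xs_ys_sums_metric_f_cardgame (dozens : List Int) (out : Int × Int) : Prop := out = calc_distance_xs_ys_sums_metric_f_cardgame_alt dozens
instance (dozens : List Int) (out : Int × Int) : Decidable (Spec_calc_distance_xs_ys_sums_metric_f_cardgame dozens out) := by unfold Spec_calc_distance_xs_ys_sums_metric_f_cardgame; infer_instance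

-- ===== CLAIM (what is proved, stated in full; the proofs are below) =====
def Claim_equal_calc_distance_xs_ys_sums_metric_f_cardgame : Prop := ∀ (dozens : List Int), Dom_calc_distance_xs_ys_sums_metric_f_cardgame dozens → Pre_calc_distance_xs_ys_sums_metric_f_cardgame dozens → Spec_calc_distance_xs_ys_sums_metric_f_cardgame dozens (calc_distance_xs_ys_sums_metric_f_cardgame dozens)

-- ===== LEMMAS AND PROOFS =====

theorem pvIf_lt_eq_min (m x : Int) : (if x < m then x else m) = min m x := by
  simp [min_def]; omega

-- characterisation of B's fold once both minima are present
theorem pvFold_char (t : List Int) (n sx sy mx my : Int) :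
    t.foldl pvFoldStep (n, sx, sy, some mx, some my) =
      (n + t.length,
       sx + (t.map (fun d => (extract_x_y_from_dozen_intval d).1)).sum,
       sy + (t.map (fun d => (extract_x_y_from_dozen_intval d).2)).sum,
       some ((t.map (fun d => (extract_x_y_from_dozen_intval d).1)).foldl min mx),
       some ((t.map (fun d => (extract_x_y_from_dozen_intval d).2)).foldl min my)) := by
  induction t generalizing n sx sy mx my with
  | nil => simp
  | cons d t ih =>
      simp only [List.foldl_cons, List.map_cons, List.sum_cons, List.length_cons, pvFoldStep,
        pvIf_lt_eq_min, ih]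
      push_cast
      simp only [Prod.mk.injEq]
      repeat' constructor
      all_goals first | rfl | ring

theorem pvSum_map_sub (l : List Int) (c : Int) :
    (l.map (fun z => z - c)).sum = l.sum - l.length * c := by
  induction l with
  | nil => simp
  | cons a l ih => simp [ih]; ring

theorem pvMain (dozens : List Int) (h : dozens ≠ []) :
    calc_distance_xs_ys_sums_metric_f_cardgame dozens =
      calc_distance_xs_ys_sums_metric_f_cardgame_alt dozens := by
  obtain ⟨d, t, rfl⟩ := List.exists_cons_of_ne_nil h
  unfold calc_distance_xs_ys_sums_metric_f_cardgame calc_distance_xs_ys_sums_metric_f_cardgame_alt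
      trans_dozens_to_points
  simp only [List.map_cons, List.foldl_cons]
  rw [PySem.List.min?_id_cons, PySem.List.min?_id_cons,
      show pvFoldStep (0, 0, 0, none, none) d =
        (1, (extract_x_y_from_dozen_intval d).1, (extract_x_y_from_dozen_intval d).2,
         some (extract_x_y_from_dozen_intval d).1, some (extract_x_y_from_dozen_intval d).2) by
          simp [pvFoldStep],
      pvFold_char]
  simp only [pvSum_map_sub, List.sum_cons, Option.getD_some]
  simp only [List.map_map, Function.comp_def, List.length_map]
  simp only [Prod.mk.injEq]
  repeat' constructor
  all_goals first | rfl | ring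

-- ===== VERDICT (by name: the statement is the Claim_ definition above) =====
theorem calc_distance_xs_ys_sums_metric_f_cardgame_spec : Claim_equal_calc_distance_xs_ys_sums_metric_f_cardgame := by
  intro dozens _ hpre
  exact (pvMain dozens hpre).symm ▸ rfl
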